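-- pv_equiv track=rewrite | github.com/magbareya/school_workspace | scripts/bagrut_questions/create_questions_index.py | ordered_topics
-- ===== SOURCE A (Python) =====
-- AGGREGATE_TOPIC_CONFIG = {
--     "basics": [
--         ("if", "الشرط"),
--         ("loops", "الحلقات"),
--         ("strings", "النص"),
--         ("arrays", "المصفوفات"),
--     ],
--     "computational_models": [
--         ("languages", "اللغات"),
--         ("dfa", "الأوتومات النهائي المحدد"),
--         ("nfa", "الأوتومات النهائي غير المحدد"),
--         ("regularity", "اللغات النظامية"),
--         ("irregularity", "إثبات عدم النظامية"),
--         ("pda", "أوتومات الراصة"),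
--         ("turing", "آلة تورينج"),
--     ],
-- }
--
-- def ordered_topics(folder, available_topics):
--     """Return topics ordered by config first, then any remaining topics alphabetically."""
--     ordered = []
--     configured = [k for k, _ in AGGREGATE_TOPIC_CONFIG.get(folder, [])]
--
--     for topic in configured:
--         if topic in available_topics:
--             ordered.append(topic)
--
--     for topic in sorted(available_topics):
--         if topic not in ordered:
--             ordered.append(topic)
--
--     return ordered
-- ===== SOURCE B (Python) =====
-- AGGREGATE_TOPIC_CONFIG = {
--     "basics": [
--         ("if", "الشرط"),
--         ("loops", "الحلقات"),
--         ("strings", "النص"),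
--         ("arrays", "المصفوفات"),
--     ],
--     "computational_models": [
--         ("languages", "اللغات"),
--         ("dfa", "الأوتومات النهائي المحدد"),
--         ("nfa", "الأوتومات النهائي غير المحدد"),
--         ("regularity", "اللغات النظامية"),
--         ("irregularity", "إثبات عدم النظامية"),
--         ("pda", "أوتومات الراصة"),
--         ("turing", "آلة تورينج"),
--     ],
-- }
--
-- def ordered_topics(folder, available_topics):
--     """Return topics ordered by config first, then any remaining topics alphabetically."""
--     rank = {k: i for i, (k, _) in enumerate(AGGREGATE_TOPIC_CONFIG.get(folder, []))}
--     n = len(rank)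
--     return sorted(set(available_topics), key=lambda t: (rank.get(t, n), t))
-- ===== Notes on version B (the rewrite author's own statement) =====
-- stated objective: simpler
-- what changed: A builds the result in two staged passes (a config loop filtering into the output, then a sorted loop appending topics while membership-testing the growing output); B instead precomputes a config-index table and produces the whole result as one sort of the deduplicated topics under the two-level key (rank.get(t, n), t).
import Mathlib
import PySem

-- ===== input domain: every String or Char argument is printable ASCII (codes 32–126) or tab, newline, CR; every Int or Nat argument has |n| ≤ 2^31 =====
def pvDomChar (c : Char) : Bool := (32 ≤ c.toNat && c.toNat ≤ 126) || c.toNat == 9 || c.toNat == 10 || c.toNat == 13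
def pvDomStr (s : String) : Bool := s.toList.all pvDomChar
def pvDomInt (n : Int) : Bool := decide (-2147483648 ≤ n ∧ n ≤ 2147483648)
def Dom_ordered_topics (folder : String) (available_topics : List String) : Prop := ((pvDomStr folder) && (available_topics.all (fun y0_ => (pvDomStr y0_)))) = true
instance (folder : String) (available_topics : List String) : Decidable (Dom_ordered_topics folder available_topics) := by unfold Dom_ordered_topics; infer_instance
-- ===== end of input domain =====

-- B replaces A's two filtering passes by a single key-driven sort of the deduplicated topics,
-- ranking each topic by a precomputed config-index table. Objective: simpler.

-- shared module constant (same-module context of both Pythons)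
def AGGREGATE_TOPIC_CONFIG : PySem.Dict String (List (String × String)) :=
  PySem.Dict.ofList [
    ("basics", [("if", "الشرط"), ("loops", "الحلقات"), ("strings", "النص"), ("arrays", "المصفوفات")]),
    ("computational_models", [("languages", "اللغات"), ("dfa", "الأوتومات النهائي المحدد"),
      ("nfa", "الأوتومات النهائي غير المحدد"), ("regularity", "اللغات النظامية"),
      ("irregularity", "إثبات عدم النظامية"), ("pda", "أوتومات الراصة"), ("turing", "آلة تورينج")])]

-- ===== PORT A =====
def ordered_topics (folder : String) (available_topics : List String) : List String :=
  let configured := (PySem.Dict.getD AGGREGATE_TOPIC_CONFIG folder []).map (fun kv => kv.1)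
  let ordered := configured.foldl
    (fun acc topic => if topic ∈ available_topics then acc ++ [topic] else acc) []
  (PySem.List.sorted available_topics (fun x => x) false).foldl
    (fun acc topic => if topic ∈ acc then acc else acc ++ [topic]) ordered

-- ===== PORT B =====
-- rank = {k: i for i, (k, _) in enumerate(AGGREGATE_TOPIC_CONFIG.get(folder, []))}
-- return sorted(set(available_topics), key=lambda t: (rank.get(t, n), t))
-- (the sort key (rank.get(t, n), t) is injective, so the set's iteration order cannot matter)
def ordered_topics_alt (folder : String) (available_topics : List String) : List String :=
  let rank : PySem.Dict String Int :=
    (PySem.List.enumerate (PySem.Dict.getD AGGREGATE_TOPIC_CONFIG folder []) 0).foldl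
      (fun d p => d.insert p.2.1 p.1) PySem.Dict.empty
  let n : Int := (PySem.Dict.size rank : Int)
  PySem.List.sorted2 (PySem.Set.ofList available_topics)
    (fun t => PySem.Dict.getD rank t n) (fun t => t) false

-- ===== PRECONDITION & SPEC =====
def Spec_ordered_topics (folder : String) (available_topics : List String) (out : List String) : Prop := out = ordered_topics_alt folder available_topics
instance (folder : String) (available_topics : List String) (out : List String) : Decidable (Spec_ordered_topics folder available_topics out) := by unfold Spec_ordered_topics; infer_instance

-- ===== CLAIM (what is proved, stated in full; the proofs are below) =====
def Claim_equal_ordered_topics : Prop := ∀ (folder : String) (available_topics : List String), Dom_ordered_topics folder available_topics → Spec_ordered_topics folder available_topics (ordered_topics folder available_topics)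

-- ===== LEMMAS AND PROOFS =====

-- sorted2 with keys k1, k2 is sorted with the lexicographic key toLex (k1 x, k2 x)
lemma sorted2_eq_sorted_lex {α : Type} (xs : List α) (k1 : α → Int) (k2 : α → String) :
    PySem.List.sorted2 xs k1 k2 false
      = PySem.List.sorted xs (fun x => toLex (k1 x, k2 x)) false := by
  have hfun : (fun (a b : α) =>
        (decide (k1 a < k1 b) || (!decide (k1 b < k1 a) && decide (k2 a < k2 b))))
      = (fun (a b : α) => decide (toLex (k1 a, k2 a) < toLex (k1 b, k2 b))) := by
    funext a b
    by_cases h1 : k1 a < k1 b <;> by_cases h2 : k1 b < k1 a <;> by_cases h3 : k2 a < k2 b <;>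
      simp [Prod.Lex.lt_iff, h1, h2, h3] <;> omega
  rw [PySem.List.sorted_eq_foldl_insertBy]
  show (List.foldl (fun acc x => PySem.List.insertBy
      (fun a b => (decide (k1 a < k1 b) || (!decide (k1 b < k1 a) && decide (k2 a < k2 b))))
      x acc) [] xs) = _
  rw [hfun]

-- A's second loop appends each topic not yet present: it yields acc ++ D where D keeps the
-- first occurrences (in order) of the elements of l that are not in acc.
lemma dedup_append_loop (l : List String) : ∀ acc : List String,
    ∃ D : List String,
      l.foldl (fun acc topic => if topic ∈ acc then acc else acc ++ [topic]) acc = acc ++ D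
      ∧ D.Sublist l ∧ D.Nodup ∧ (∀ x, x ∈ D ↔ x ∈ l ∧ x ∉ acc) := by
  induction l with
  | nil => intro acc; exact ⟨[], by simp, by simp, by simp, by simp⟩
  | cons t l ih =>
    intro acc
    by_cases ht : t ∈ acc
    · obtain ⟨D, h1, h2, h3, h4⟩ := ih acc
      refine ⟨D, by simpa [ht] using h1, h2.cons t, h3, ?_⟩
      intro x
      rw [h4]
      constructor
      · rintro ⟨hl, hacc⟩; exact ⟨List.mem_cons_of_mem t hl, hacc⟩
      · rintro ⟨hl, hacc⟩
        rcases List.mem_cons.mp hl with rfl | hl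
        · exact absurd ht hacc
        · exact ⟨hl, hacc⟩
    · obtain ⟨D, h1, h2, h3, h4⟩ := ih (acc ++ [t])
      refine ⟨t :: D, ?_, h2.cons₂ t, ?_, ?_⟩
      · simpa [ht, List.append_assoc] using h1
      · refine List.nodup_cons.mpr ⟨fun hmem => ?_, h3⟩
        have := (h4 t).mp hmem
        simp at this
      · intro x
        rcases eq_or_ne x t with rfl | hxt
        · simp [ht]
        · simp only [List.mem_cons, hxt, false_or, h4, List.mem_append]
          tauto

-- the configured key lists of the module constant always have pairwise-distinct keys
lemma cfg_keys_nodup (folder : String) :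
    ((PySem.Dict.getD AGGREGATE_TOPIC_CONFIG folder []).map (fun kv => kv.1)).Nodup := by
  by_cases h1 : folder = "basics"
  · subst h1; decide
  · by_cases h2 : folder = "computational_models"
    · subst h2; decide
    · have hAG : AGGREGATE_TOPIC_CONFIG = PySem.Dict.mk [
        ("basics", [("if", "الشرط"), ("loops", "الحلقات"), ("strings", "النص"), ("arrays", "المصفوفات")]),
        ("computational_models", [("languages", "اللغات"), ("dfa", "الأوتومات النهائي المحدد"),
          ("nfa", "الأوتومات النهائي غير المحدد"), ("regularity", "اللغات النظامية"),
          ("irregularity", "إثبات عدم النظامية"), ("pda", "أوتومات الراصة"), ("turing", "آلة تورينج")])] := by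
        decide
      have b1 : ("basics" == folder) = false := beq_eq_false_iff_ne.mpr (Ne.symm h1)
      have b2 : ("computational_models" == folder) = false := beq_eq_false_iff_ne.mpr (Ne.symm h2)
      rw [hAG, PySem.Dict.getD_eq_get?_getD, PySem.Dict.get?_mk_cons, b1]
      rw [if_neg (by simp), PySem.Dict.get?_mk_cons, b2, if_neg (by simp)]
      simp [PySem.Dict.get?]

-- core equivalence, generic in the configured list (only its key-distinctness is used)
lemma core_eq (cfg : List (String × String)) (hnd : (cfg.map (fun kv => kv.1)).Nodup)
    (avail : List String) :
    (PySem.List.sorted avail (fun x => x) false).foldl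
        (fun acc topic => if topic ∈ acc then acc else acc ++ [topic])
        ((cfg.map (fun kv => kv.1)).foldl
          (fun acc topic => if topic ∈ avail then acc ++ [topic] else acc) [])
      = PySem.List.sorted2 (PySem.Set.ofList avail)
          (fun t => PySem.Dict.getD
            ((PySem.List.enumerate cfg 0).foldl (fun d p => d.insert p.2.1 p.1) PySem.Dict.empty)
            t ((PySem.Dict.size ((PySem.List.enumerate cfg 0).foldl
                  (fun d p => d.insert p.2.1 p.1) PySem.Dict.empty) : Int)))
          (fun t => t) false := by
  set C := cfg.map (fun kv => kv.1) with hCdef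
  set rank : PySem.Dict String Int :=
    (PySem.List.enumerate cfg 0).foldl (fun d p => d.insert p.2.1 p.1) PySem.Dict.empty with hrankdef
  -- the rank dict is exactly [(C[i], i)]
  have hmapk : (PySem.List.enumerate cfg 0).map (fun p => p.2.1) = C := by
    rw [hCdef]
    conv_rhs => rw [← PySem.List.map_snd_enumerate cfg 0]
    rw [List.map_map]
    rfl
  have hitems : rank.items
      = (PySem.List.enumerate cfg 0).map (fun p => (p.2.1, (p.1 : Int))) := by
    rw [hrankdef]
    have := PySem.Dict.items_foldl_insert_fresh (PySem.List.enumerate cfg 0)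
      (fun p => p.2.1) (fun p => p.1) PySem.Dict.empty
      (fun a _ => by simp [PySem.Dict.contains_empty]) (by rw [hmapk]; exact hnd)
    simpa [PySem.Dict.items] using this
  have hkeys : rank.keys = C := by
    show rank.items.map (fun p => p.1) = C
    rw [hitems, List.map_map]
    simpa [Function.comp_def] using hmapk
  have hkeysnd : rank.keys.Nodup := by rw [hkeys]; exact hnd
  have hsize : (PySem.Dict.size rank : Int) = (cfg.length : Int) := by
    show ((rank.items.length : Nat) : Int) = _
    rw [hitems]
    simp [PySem.List.length_enumerate]
  set n : Int := (PySem.Dict.size rank : Int) with hndef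
  have hClen : C.length = cfg.length := by simp [hCdef]
  -- rank of the i-th configured key is i
  have hrank_mem : ∀ (i : Nat) (hi : i < C.length), rank.getD C[i] n = (i : Int) := by
    intro i hi
    have hlen : i < (PySem.List.enumerate cfg 0).length := by
      rw [PySem.List.length_enumerate]; omega
    have hmem : (C[i], (i : Int)) ∈ rank.items := by
      rw [hitems]
      refine List.mem_iff_getElem.mpr ⟨i, by simpa using hlen, ?_⟩
      simp [PySem.List.getElem_enumerate, hCdef]
    exact PySem.Dict.getD_of_mem_items rank hmem hkeysnd n
  -- rank of an unconfigured topic is n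
  have hrank_not : ∀ t : String, t ∉ C → rank.getD t n = n := by
    intro t ht
    refine PySem.Dict.getD_of_not_contains rank n ?_
    rw [PySem.Dict.contains_eq_decide_mem_keys, hkeys]
    simpa using ht
  -- A's first loop is a filter of C
  rw [PySem.List.foldl_append_ite_eq_filter (p := fun topic => topic ∈ avail)]
  rw [List.nil_append]
  set head := C.filter (fun x => decide (x ∈ avail)) with hheaddef
  -- A's second loop appends the deduplicated tail D
  obtain ⟨D, h1, h2, h3, h4⟩ :=
    dedup_append_loop (PySem.List.sorted avail (fun x => x) false) head
  rw [h1]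
  -- B is the sort by K
  rw [sorted2_eq_sorted_lex]
  refine (PySem.List.sorted_eq_of_perm_of_pairwise_lt _ _
    (fun t => toLex (rank.getD t n, t)) ?_ ?_).symm
  · -- head ++ D is a permutation of set(avail)
    have hheadsub : head.Sublist C := List.filter_sublist
    have hheadnd : head.Nodup := hheadsub.nodup hnd
    have hDnotC : ∀ x ∈ D, x ∉ C := by
      intro x hx hxC
      have hxav : x ∈ avail := by
        have := ((h4 x).mp hx).1
        rwa [PySem.List.mem_sorted] at this
      have : x ∈ head := by
        rw [hheaddef, List.mem_filter]
        exact ⟨hxC, by simpa using hxav⟩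
      exact ((h4 x).mp hx).2 this
    have hnodup : (head ++ D).Nodup := by
      rw [List.nodup_append]
      refine ⟨hheadnd, h3, ?_⟩
      intro x hx y hy heq
      subst heq
      exact hDnotC x hy (List.Sublist.mem hx hheadsub)
    rw [List.perm_ext_iff_of_nodup hnodup (PySem.Set.nodup_ofList avail)]
    intro x
    rw [List.mem_append, PySem.Set.mem_ofList]
    constructor
    · rintro (hx | hx)
      · rw [hheaddef, List.mem_filter] at hx
        simpa using hx.2
      · have := ((h4 x).mp hx).1
        rwa [PySem.List.mem_sorted] at this
    · intro hx
      by_cases hxC : x ∈ C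
      · exact Or.inl (by rw [hheaddef, List.mem_filter]; exact ⟨hxC, by simpa using hx⟩)
      · refine Or.inr ((h4 x).mpr ⟨by rwa [PySem.List.mem_sorted], fun hxh => ?_⟩)
        exact hxC (List.Sublist.mem hxh hheadsub)
  · -- head ++ D is strictly increasing under K
    rw [List.pairwise_append]
    refine ⟨?_, ?_, ?_⟩
    · -- head: ranks are the (strictly increasing) config indices
      have hCpw : C.Pairwise (fun a b =>
          toLex (rank.getD a n, a) < toLex (rank.getD b n, b)) := by
        rw [List.pairwise_iff_getElem]
        intro i j hi hj hij
        have hia := hrank_mem i hi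
        have hja := hrank_mem j hj
        simp only [hia, hja, Prod.Lex.lt_iff, ofLex_toLex]
        exact Or.inl (by exact_mod_cast hij)
      exact hCpw.sublist List.filter_sublist
    · -- D: ranks are all n, topics strictly increasing alphabetically
      have hDle : D.Pairwise (fun a b => a ≤ b) :=
        (PySem.List.sorted_pairwise avail (fun x => x)).sublist h2
      have hDlt : D.Pairwise (fun a b => a < b) := by
        have hne : D.Pairwise (fun a b => a ≠ b) := h3
        exact (hDle.and hne).imp (fun h => lt_of_le_of_ne h.1 h.2)
      refine List.Pairwise.imp_of_mem ?_ hDlt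
      intro a b ha hb hab
      have hra := hrank_not a (by
        intro hC
        have hxav : a ∈ avail := by
          have := ((h4 a).mp ha).1
          rwa [PySem.List.mem_sorted] at this
        exact ((h4 a).mp ha).2 (by rw [hheaddef, List.mem_filter]; exact ⟨hC, by simpa using hxav⟩))
      have hrb := hrank_not b (by
        intro hC
        have hxav : b ∈ avail := by
          have := ((h4 b).mp hb).1
          rwa [PySem.List.mem_sorted] at this
        exact ((h4 b).mp hb).2 (by rw [hheaddef, List.mem_filter]; exact ⟨hC, by simpa using hxav⟩))
      simp only [hra, hrb, Prod.Lex.lt_iff, ofLex_toLex]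
      exact Or.inr ⟨trivial, hab⟩
    · -- cross: every configured rank i < n ≤ rank of an unconfigured tail topic
      intro a ha b hb
      obtain ⟨i, hi, rfl⟩ := List.mem_iff_getElem.mp (List.Sublist.mem ha List.filter_sublist)
      have hia := hrank_mem i hi
      have hrb := hrank_not b (by
        intro hC
        have hxav : b ∈ avail := by
          have := ((h4 b).mp hb).1
          rwa [PySem.List.mem_sorted] at this
        exact ((h4 b).mp hb).2 (by rw [hheaddef, List.mem_filter]; exact ⟨hC, by simpa using hxav⟩))
      simp only [hia, hrb, Prod.Lex.lt_iff, ofLex_toLex]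
      refine Or.inl ?_
      rw [hsize, ← hClen]
      exact_mod_cast hi

theorem ordered_topics_eq (folder : String) (available_topics : List String) :
    ordered_topics folder available_topics = ordered_topics_alt folder available_topics := by
  unfold ordered_topics ordered_topics_alt
  exact core_eq (PySem.Dict.getD AGGREGATE_TOPIC_CONFIG folder [])
    (cfg_keys_nodup folder) available_topics

-- ===== VERDICT (by name: the statement is the Claim_ definition above) =====
theorem ordered_topics_spec : Claim_equal_ordered_topics := by
  intro folder available_topics _
  exact ordered_topics_eq folder available_topics
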